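-- pv_equiv track=rewrite | github.com/fhnw-ise-qcrypt/oqs-demos | openssh/benchmark/plot_results.py | percentileString
-- ===== SOURCE A (Python) =====
-- def percentileString(calcPercentiles):
--     percStr = ''
--     if len(calcPercentiles) == 1:
--         percStr = '{}th percentile'.format(calcPercentiles[0])
--     else:
--         for i, p in enumerate(calcPercentiles, 1):
--             if i == len(calcPercentiles):
--                 percStr += 'and {}th percentile'.format(p)
--             elif i == len(calcPercentiles) - 1:
--                 percStr += '{}th '.format(p)
--             else:
--                 percStr += '{}th, '.format(p)
--     return percStr
-- ===== SOURCE B (Python) =====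
-- def percentileString(calcPercentiles):
--     parts = ['{}th'.format(p) for p in calcPercentiles]
--     if not parts:
--         return ''
--     if len(parts) == 1:
--         return parts[0] + ' percentile'
--     return ', '.join(parts[:-1]) + ' and ' + parts[-1] + ' percentile'
-- ===== Notes on version B (the rewrite author's own statement) =====
-- stated objective: idiomatic
-- what changed: Replaces the positional i==len/i==len-1 branching inside an accumulating enumerate loop by a map to '{}th' parts followed by a join of all but the last part plus ' and last percentile', with explicit empty/singleton cases.
import Mathlib
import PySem

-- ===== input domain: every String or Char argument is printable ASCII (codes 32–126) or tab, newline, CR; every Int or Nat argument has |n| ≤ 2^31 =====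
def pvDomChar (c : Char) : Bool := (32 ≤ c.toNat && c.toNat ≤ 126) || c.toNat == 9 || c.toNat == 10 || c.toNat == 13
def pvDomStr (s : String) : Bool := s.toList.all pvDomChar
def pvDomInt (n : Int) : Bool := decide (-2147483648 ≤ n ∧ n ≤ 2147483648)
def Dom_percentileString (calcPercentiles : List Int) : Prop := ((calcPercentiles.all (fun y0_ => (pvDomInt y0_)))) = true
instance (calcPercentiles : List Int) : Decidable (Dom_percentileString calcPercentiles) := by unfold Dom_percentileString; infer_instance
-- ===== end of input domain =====

-- B replaces A's positional i==len / i==len-1 branching inside an accumulating loop by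
-- mapping each percentile to a '{}th' part and joining all but the last with ', ' plus an
-- ' and <last> percentile' tail (objective: idiomatic). Same O(n) cost.

-- ===== PORT A =====
-- The for-loop over enumerate(calcPercentiles, 1), accumulating into percStr.
def percentileLoopA (n : Nat) : List Int → Nat → String → String
  | [], _, acc => acc
  | p :: rest, i, acc =>
    percentileLoopA n rest (i + 1)
      (acc ++ (if i = n then "and " ++ PySem.Int.toStr p ++ "th percentile"
               else if i = n - 1 then PySem.Int.toStr p ++ "th "
               else PySem.Int.toStr p ++ "th, "))

def percentileString (calcPercentiles : List Int) : String :=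
  if calcPercentiles.length = 1 then
    -- calcPercentiles[0]; in this branch the index is in range, so getD never defaults
    "" ++ PySem.Int.toStr ((PySem.List.pyGet? calcPercentiles 0).getD 0) ++ "th percentile"
  else
    percentileLoopA calcPercentiles.length calcPercentiles 1 ""

-- ===== PORT B =====
def percentileString_alt (calcPercentiles : List Int) : String :=
  let parts := calcPercentiles.map (fun p => PySem.Int.toStr p ++ "th")
  match parts with
  | [] => ""
  | [x] => x ++ " percentile"
  | _ => PySem.Str.join ", " parts.dropLast ++ " and " ++ parts.getLast! ++ " percentile"

-- ===== PRECONDITION & SPEC =====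
def Spec_percentileString (calcPercentiles : List Int) (out : String) : Prop := out = percentileString_alt calcPercentiles
instance (calcPercentiles : List Int) (out : String) : Decidable (Spec_percentileString calcPercentiles out) := by unfold Spec_percentileString; infer_instance

-- ===== CLAIM (what is proved, stated in full; the proofs are below) =====
def Claim_equal_percentileString : Prop := ∀ (calcPercentiles : List Int), Dom_percentileString calcPercentiles → Spec_percentileString calcPercentiles (percentileString calcPercentiles)

-- ===== LEMMAS AND PROOFS =====

-- Intermediate description of A's loop output for a suffix that ends the list.
def gTail : List Int → String
  | [] => ""
  | [p] => "and " ++ PySem.Int.toStr p ++ "th percentile"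
  | [p, q] => PySem.Int.toStr p ++ "th " ++ gTail [q]
  | p :: rest => PySem.Int.toStr p ++ "th, " ++ gTail rest

theorem loopA_eq_gTail : ∀ (ys : List Int) (n i : Nat) (acc : String),
    i + ys.length = n + 1 → 1 ≤ i → 2 ≤ n →
    percentileLoopA n ys i acc = acc ++ gTail ys := by
  intro ys
  induction ys with
  | nil =>
    intro n i acc h _ _
    simp [percentileLoopA, gTail]
  | cons p rest ih =>
    intro n i acc h h1 h2
    simp only [List.length_cons] at h
    match rest, h with
    | [], h =>
      have hi : i = n := by simp at h; omega
      simp [percentileLoopA, gTail, hi]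
    | [q], h =>
      have hi : i = n - 1 := by simp at h; omega
      have hne : i ≠ n := by simp at h; omega
      rw [percentileLoopA, if_neg hne, if_pos hi,
        ih n (i + 1) _ (by simp at h ⊢; omega) (by omega) h2]
      apply String.toList_inj.mp
      simp [gTail, String.toList_append]
    | q :: r :: rest', h =>
      have hne : i ≠ n := by simp at h; omega
      have hne' : i ≠ n - 1 := by simp at h; omega
      rw [percentileLoopA, if_neg hne, if_neg hne',
        ih n (i + 1) _ (by simp at h ⊢; omega) (by omega) h2]
      apply String.toList_inj.mp
      simp [gTail, String.toList_append]

theorem gTail_eq_join : ∀ (p q : Int) (rest : List Int),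
    gTail (p :: q :: rest) =
      PySem.Str.join ", " (((p :: q :: rest).map (fun x => PySem.Int.toStr x ++ "th")).dropLast)
        ++ " and " ++ (((p :: q :: rest).map (fun x => PySem.Int.toStr x ++ "th")).getLast!)
        ++ " percentile" := by
  intro p q rest
  induction rest generalizing p q with
  | nil =>
    apply String.toList_inj.mp
    simp [gTail, String.toList_append, PySem.Str.join, PySem.Chars.join_singleton,
      List.getLast!]
  | cons r rest' ih =>
    rw [show gTail (p :: q :: r :: rest') = PySem.Int.toStr p ++ "th, " ++ gTail (q :: r :: rest') from rfl,
      ih q r]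
    apply String.toList_inj.mp
    simp only [List.map_cons, List.dropLast_cons_of_ne_nil, List.cons_ne_nil, ne_eq,
      not_false_iff, String.toList_append, PySem.Str.join, PySem.Chars.join_cons_cons]
    simp [String.toList_append]

-- ===== VERDICT (by name: the statement is the Claim_ definition above) =====
theorem percentileString_spec : Claim_equal_percentileString := by
  unfold Claim_equal_percentileString
  intro xs _
  unfold Spec_percentileString percentileString percentileString_alt
  match xs with
  | [] => simp [percentileLoopA]
  | [p] =>
    apply String.toList_inj.mp
    simp [PySem.List.pyGet?, PySem.List.pyIdx?, String.toList_append]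
  | p :: q :: rest =>
    have hlen : (p :: q :: rest).length ≠ 1 := by simp
    rw [if_neg hlen,
      loopA_eq_gTail (p :: q :: rest) (p :: q :: rest).length 1 ""
        (by simp only [List.length_cons]; omega) le_rfl (by simp only [List.length_cons]; omega),
      gTail_eq_join]
    apply String.toList_inj.mp
    simp [String.toList_append]
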